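-- pv_equiv track=rewrite | github.com/JDaniloC/Individual-DiffAlgorithm | patience.py | patienceSorting
-- ===== SOURCE A (Python) =====
-- def patienceSorting(lista):
--     pilhas = [[(lista[0], lista[0])]]
--     for i in range(1, len(lista)):
--         ver, atual = False, lista[i]
--         for j in range(len(pilhas)):
--             if pilhas[j][-1][0] > atual:
--                 pilhas[j].append((atual, pilhas[j-1][-1][0]))
--                 ver = True
--                 break
--         if not ver:
--             pilhas.append([(atual, pilhas[-1][-1][0])])
--     return pilhas
-- ===== SOURCE B (Python) =====
-- def patienceSorting(lista):
--     piles = [[(lista[0], lista[0])]]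
--     tops = [lista[0]]
--     for atual in lista[1:]:
--         lo, hi = 0, len(tops)
--         while lo < hi:  # binary search: leftmost pile top > atual (tops stay sorted)
--             mid = (lo + hi) // 2
--             if tops[mid] <= atual:
--                 lo = mid + 1
--             else:
--                 hi = mid
--         j = lo
--         if j == len(tops):
--             piles.append([(atual, tops[-1])])
--             tops.append(atual)
--         else:
--             piles[j].append((atual, tops[j - 1]))
--             tops[j] = atual
--     return piles
-- ===== Notes on version B (the rewrite author's own statement) =====
-- stated objective: faster
-- what changed: Replaces A's linear scan over all pile tops per element with a hand-written binary search over a separately maintained (always-sorted) list of pile tops, giving O(n log n) instead of O(n^2).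
import Mathlib
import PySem

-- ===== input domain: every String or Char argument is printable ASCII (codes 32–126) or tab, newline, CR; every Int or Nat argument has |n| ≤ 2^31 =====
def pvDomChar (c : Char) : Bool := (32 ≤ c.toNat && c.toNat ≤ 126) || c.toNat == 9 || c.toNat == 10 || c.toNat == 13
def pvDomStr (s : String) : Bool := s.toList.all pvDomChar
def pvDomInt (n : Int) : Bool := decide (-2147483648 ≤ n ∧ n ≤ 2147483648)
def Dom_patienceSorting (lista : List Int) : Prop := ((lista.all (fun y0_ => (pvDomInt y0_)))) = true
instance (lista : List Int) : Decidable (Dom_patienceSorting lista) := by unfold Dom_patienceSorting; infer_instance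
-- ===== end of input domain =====

-- B replaces A's per-element linear scan of pile tops by a binary search over a
-- separately maintained, always-sorted list of pile tops (O(n log n) vs O(n^2)).


-- ===== PORT A =====
-- pile[-1][0]: top value of a pile (piles are never empty when read; default (0,0) unused)
def pileTop (p : List (Int × Int)) : Int := (PySem.List.pyGetD p (-1) (0, 0)).1

-- the inner 'for j in range(len(pilhas)): if pilhas[j][-1][0] > atual: … break'
def scanA (atual : Int) : List (List (Int × Int)) → Nat → Option Nat
  | [], _ => none
  | p :: tl, j => if pileTop p > atual then some j else scanA atual tl (j + 1)

def stepA (pilhas : List (List (Int × Int))) (atual : Int) : List (List (Int × Int)) :=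
  match scanA atual pilhas 0 with
  | some j =>
      -- pilhas[j].append((atual, pilhas[j-1][-1][0]))  (Python: j-1 wraps to last pile when j = 0)
      pilhas.set j ((pilhas.getD j []) ++ [(atual, pileTop (PySem.List.pyGetD pilhas ((j : Int) - 1) []))])
  | none =>
      -- pilhas.append([(atual, pilhas[-1][-1][0])])
      pilhas ++ [[(atual, pileTop (PySem.List.pyGetD pilhas (-1) []))]]

def patienceSorting (lista : List Int) : List (List (Int × Int)) :=
  match lista with
  | [] => []  -- Python raises IndexError here; excluded by Pre_
  | x :: rest => rest.foldl stepA [[(x, x)]]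

-- ===== PORT B =====
-- Source B's hand-written 'lo, hi' binary-search loop is exactly PySem.List.bisectRight's loop.
def stepB (st : List (List (Int × Int)) × List Int) (atual : Int) :
    List (List (Int × Int)) × List Int :=
  let piles := st.1
  let tops := st.2
  let j := PySem.List.bisectRight tops atual
  if j = tops.length then
    (piles ++ [[(atual, PySem.List.pyGetD tops (-1) 0)]], tops ++ [atual])
  else
    (piles.set j ((piles.getD j []) ++ [(atual, PySem.List.pyGetD tops ((j : Int) - 1) 0)]),
     tops.set j atual)

def patienceSorting_alt (lista : List Int) : List (List (Int × Int)) :=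
  match lista with
  | [] => []
  | x :: rest => (rest.foldl stepB ([[(x, x)]], [x])).1

-- ===== PRECONDITION & SPEC =====
-- Python A raises IndexError on the empty list (lista[0]); B does the same.
def Pre_patienceSorting (lista : List Int) : Prop := lista ≠ []
instance (lista : List Int) : Decidable (Pre_patienceSorting lista) := by
  unfold Pre_patienceSorting; infer_instance

def pvWitness_patienceSorting : List Int := [3, 1, 4, 1, 5]

def Spec_patienceSorting (lista : List Int) (out : List (List (Int × Int))) : Prop :=
  out = patienceSorting_alt lista
instance (lista : List Int) (out : List (List (Int × Int))) : Decidable (Spec_patienceSorting lista out) := by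
  unfold Spec_patienceSorting; infer_instance

-- ===== CLAIM (what is proved, stated in full; the proofs are below) =====
def Claim_equal_patienceSorting : Prop :=
  ∀ (lista : List Int), Dom_patienceSorting lista → Pre_patienceSorting lista →
    Spec_patienceSorting lista (patienceSorting lista)

-- ===== LEMMAS AND PROOFS =====

-- the loop invariant relating A's state to B's state
def PInv (piles : List (List (Int × Int))) (tops : List Int) : Prop :=
  tops = piles.map pileTop ∧ piles ≠ [] ∧ List.Pairwise (· ≤ ·) tops

lemma pileTop_pair (x y : Int) : pileTop [(x, y)] = x := rfl

lemma pileTop_append (l : List (Int × Int)) (x : Int × Int) : pileTop (l ++ [x]) = x.1 := by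
  simp [pileTop, PySem.List.pyGetD, PySem.List.pyGet?, PySem.List.pyIdx?]

lemma scanA_eq_findIdx (atual : Int) (piles : List (List (Int × Int))) (j0 : Nat) :
    scanA atual piles j0 = ((piles.map pileTop).findIdx? (fun t => atual < t)).map (· + j0) := by
  induction piles generalizing j0 with
  | nil => simp [scanA]
  | cons p tl ih =>
      simp only [scanA, List.map_cons, List.findIdx?_cons, decide_eq_true_eq]
      by_cases h : pileTop p > atual
      · simp [h]
      · rw [if_neg h, if_neg (by simpa using h), ih (j0 + 1)]
        cases (tl.map pileTop).findIdx? (fun t => atual < t)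
        · simp
        · simp; omega

lemma findIdx?_of_bisect (tops : List Int) (atual : Int)
    (hs : List.Pairwise (· ≤ ·) tops) :
    tops.findIdx? (fun t => atual < t) =
      if PySem.List.bisectRight tops atual < tops.length
      then some (PySem.List.bisectRight tops atual) else none := by
  obtain ⟨hle, hbelow, habove⟩ := PySem.List.bisectRight_spec tops atual hs
  set b := PySem.List.bisectRight tops atual with hb
  by_cases h : b < tops.length
  · rw [if_pos h, List.findIdx?_eq_some_iff_getElem]
    exact ⟨h, by simpa using habove b h le_rfl,
      fun j hj => by simpa using not_lt.mpr (hbelow j (by omega) hj)⟩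
  · rw [if_neg h, List.findIdx?_eq_none_iff]
    intro x hx
    obtain ⟨k, hk, rfl⟩ := List.mem_iff_getElem.mp hx
    simpa using not_lt.mpr (hbelow k hk (by omega))

-- step equality + invariant preservation
lemma step_eq (piles : List (List (Int × Int))) (tops : List Int) (atual : Int)
    (hInv : PInv piles tops) :
    stepA piles atual = (stepB (piles, tops) atual).1 ∧
      PInv (stepB (piles, tops) atual).1 (stepB (piles, tops) atual).2 := by
  obtain ⟨htops, hne, hs⟩ := hInv
  obtain ⟨hle, hbelow, habove⟩ := PySem.List.bisectRight_spec tops atual hs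
  set b := PySem.List.bisectRight tops atual with hb
  have hget : ∀ i : Int, PySem.List.pyGetD tops i 0 = pileTop (PySem.List.pyGetD piles i []) := by
    intro i
    rw [htops, show (0 : Int) = pileTop [] from rfl, PySem.List.pyGetD_map]
  have hscan : scanA atual piles 0 = if b < tops.length then some b else none := by
    rw [scanA_eq_findIdx, ← htops, findIdx?_of_bisect tops atual hs, ← hb]
    split <;> simp
  by_cases h : b < tops.length
  · -- placement case: both append to pile b
    have hlen : b < piles.length := by rw [htops] at h; simpa using h
    simp only [stepA, stepB, hscan, if_pos h, ← hb, if_neg (Nat.ne_of_lt h), hget]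
    refine ⟨trivial, ?_, ?_, ?_⟩
    · simp [htops, List.map_set, pileTop_append]
    · intro hcon
      exact hne (by simpa using congrArg List.length hcon)
    · rw [List.pairwise_iff_getElem] at hs ⊢
      intro i j hi hj hij
      simp only [List.length_set] at hi hj
      rw [List.getElem_set, List.getElem_set]
      rcases eq_or_ne b i with rfl | hbi
      · rw [if_pos rfl, if_neg (by omega)]
        exact le_of_lt (habove j hj (by omega))
      · rw [if_neg hbi]
        rcases eq_or_ne b j with rfl | hbj
        · rw [if_pos rfl]
          exact hbelow i hi (by omega)
        · rw [if_neg hbj]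
          exact hs i j hi hj hij
  · -- new-pile case: both append a new singleton pile
    have hblen : b = tops.length := by omega
    simp only [stepA, stepB, hscan, if_neg h, ← hb, if_pos hblen, hget]
    refine ⟨trivial, ?_, by simp, ?_⟩
    · simp [htops, pileTop_pair]
    · rw [List.pairwise_append]
      refine ⟨hs, by simp, ?_⟩
      intro a ha c hc
      obtain ⟨k, hk, rfl⟩ := List.mem_iff_getElem.mp ha
      simp only [List.mem_singleton] at hc
      subst hc
      exact hbelow k hk (by omega)

lemma fold_eq (rest : List Int) (piles : List (List (Int × Int))) (tops : List Int)
    (hPInv : PInv piles tops) :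
    rest.foldl stepA piles = (rest.foldl stepB (piles, tops)).1 := by
  induction rest generalizing piles tops with
  | nil => rfl
  | cons a tl ih =>
      obtain ⟨h1, h2⟩ := step_eq piles tops a hPInv
      simp only [List.foldl_cons, h1]
      exact ih _ _ h2

-- ===== VERDICT (by name: the statement is the Claim_ definition above) =====
theorem patienceSorting_spec : Claim_equal_patienceSorting := by
  intro lista _ hpre
  unfold Spec_patienceSorting
  match lista with
  | [] => exact absurd rfl hpre
  | x :: rest =>
      show rest.foldl stepA [[(x, x)]] = (rest.foldl stepB ([[(x, x)]], [x])).1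
      exact fold_eq rest [[(x, x)]] [x] ⟨by simp [pileTop_pair], by simp, by simp⟩
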